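-- pv_equiv track=rewrite | github.com/Brant-B/subTeX | subTeX/composing.py | _split_texts_into_lines
-- ===== SOURCE A (Python) =====
-- def _split_texts_into_lines(fonts_and_texts):
--     line = []
--     for font_name, text in fonts_and_texts:
--         pieces = text.split('\n')
--         if pieces[0]:
--             line.append((font_name, pieces[0]))
--         for piece in pieces[1:]:
--             yield line
--             line = []
--             if piece:
--                 line.append((font_name, piece))
--     yield line
-- ===== SOURCE B (Python) =====
-- _BREAK = object()
--
-- def _split_texts_into_lines(fonts_and_texts):
--     # pass 1: flatten segments into tokens, a BREAK sentinel before every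
--     # piece except the first piece of each segment
--     tokens = []
--     for font_name, text in fonts_and_texts:
--         first, *rest = text.split('\n')
--         tokens.append((font_name, first))
--         for piece in rest:
--             tokens.append(_BREAK)
--             tokens.append((font_name, piece))
--     # pass 2: split the token stream on BREAKs; each group becomes a line
--     # with the empty pieces dropped (an empty token list still yields one
--     # empty line, like the trailing yield of the streaming version)
--     group = []
--     for tok in tokens:
--         if tok is _BREAK:
--             yield [(f, p) for (f, p) in group if p]
--             group = []
--         else:
--             group.append(tok)
--     yield [(f, p) for (f, p) in group if p]
-- ===== Notes on version B (the rewrite author's own statement) =====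
-- stated objective: alternative
-- what changed: Replaces A's single streaming pass that mutates the current line while iterating segments with a two-pass tokenise-then-group design: pass one flattens all segments into a token list with BREAK sentinels at intra-segment newlines, pass two splits the tokens on sentinels and filters empty pieces per group.
import Mathlib
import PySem

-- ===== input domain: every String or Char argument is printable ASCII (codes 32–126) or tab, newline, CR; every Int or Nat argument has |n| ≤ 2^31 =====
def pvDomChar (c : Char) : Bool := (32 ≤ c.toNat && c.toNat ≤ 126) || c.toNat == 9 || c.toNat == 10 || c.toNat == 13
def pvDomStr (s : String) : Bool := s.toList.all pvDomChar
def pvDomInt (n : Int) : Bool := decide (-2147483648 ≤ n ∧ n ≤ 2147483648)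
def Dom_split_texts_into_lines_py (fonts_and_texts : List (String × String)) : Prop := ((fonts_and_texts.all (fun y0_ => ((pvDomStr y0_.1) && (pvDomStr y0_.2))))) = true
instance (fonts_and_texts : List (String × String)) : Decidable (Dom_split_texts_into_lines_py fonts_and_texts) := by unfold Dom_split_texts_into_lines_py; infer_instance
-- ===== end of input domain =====

-- B replaces A's streaming generator by a two-pass tokenise-then-group form (alternative decomposition, same cost).
-- Both versions are generators in Python; the ports return the list of yielded lines.

-- ===== PORT A =====
-- text.split('\n'); Str.split? is none only for an empty separator, unreachable here
def pvPieces (s : String) : List String := (PySem.Str.split? s "\n").getD []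

-- inner loop: 'for piece in pieces[1:]: yield line; line = []; if piece: line.append(...)'
def pvLineStep (f : String) (st : List (List (String × String)) × List (String × String))
    (piece : String) : List (List (String × String)) × List (String × String) :=
  (st.1 ++ [st.2], if piece ≠ "" then [(f, piece)] else [])

-- one iteration of the outer 'for font_name, text in fonts_and_texts' loop
def pvSegStep (st : List (List (String × String)) × List (String × String))
    (seg : String × String) : List (List (String × String)) × List (String × String) :=
  match pvPieces seg.2 with
  | [] => st  -- unreachable: str.split never returns an empty list
  | p0 :: rest =>
      rest.foldl (pvLineStep seg.1) (st.1, if p0 ≠ "" then st.2 ++ [(seg.1, p0)] else st.2)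

def split_texts_into_lines_py (fonts_and_texts : List (String × String)) :
    List (List (String × String)) :=
  let st := fonts_and_texts.foldl pvSegStep ([], [])
  st.1 ++ [st.2]

-- ===== PORT B =====
-- pass 1: token list; 'none' is the BREAK sentinel
def pvTokens (xs : List (String × String)) : List (Option (String × String)) :=
  xs.foldl (fun toks seg =>
    match pvPieces seg.2 with
    | [] => toks  -- unreachable: str.split never returns an empty list
    | first :: rest =>
        rest.foldl (fun t p => t ++ [none, some (seg.1, p)]) (toks ++ [some (seg.1, first)])) []

-- '[(f, p) for (f, p) in group if p]'
def pvFlushGroup (g : List (String × String)) : List (String × String) :=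
  g.filter (fun fp => fp.2 ≠ "")

-- pass 2: one step of the grouping loop
def pvTokStep (st : List (List (String × String)) × List (String × String))
    (tok : Option (String × String)) : List (List (String × String)) × List (String × String) :=
  match tok with
  | none => (st.1 ++ [pvFlushGroup st.2], [])
  | some t => (st.1, st.2 ++ [t])

def split_texts_into_lines_py_alt (fonts_and_texts : List (String × String)) :
    List (List (String × String)) :=
  let st := (pvTokens fonts_and_texts).foldl pvTokStep ([], [])
  st.1 ++ [pvFlushGroup st.2]

-- ===== PRECONDITION & SPEC =====
def Spec_split_texts_into_lines_py (fonts_and_texts : List (String × String)) (out : List (List (String × String))) : Prop := out = split_texts_into_lines_py_alt fonts_and_texts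
instance (fonts_and_texts : List (String × String)) (out : List (List (String × String))) : Decidable (Spec_split_texts_into_lines_py fonts_and_texts out) := by unfold Spec_split_texts_into_lines_py; infer_instance

-- ===== CLAIM (what is proved, stated in full; the proofs are below) =====
def Claim_equal_split_texts_into_lines_py : Prop := ∀ (fonts_and_texts : List (String × String)), Dom_split_texts_into_lines_py fonts_and_texts → Spec_split_texts_into_lines_py fonts_and_texts (split_texts_into_lines_py fonts_and_texts)

-- ===== LEMMAS AND PROOFS =====

-- the tokens one segment contributes
def pvSegToks (seg : String × String) : List (Option (String × String)) :=
  match pvPieces seg.2 with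
  | [] => []
  | f :: r => some (seg.1, f) :: r.flatMap (fun p => [none, some (seg.1, p)])

theorem pvTokens_eq_flatMap_aux (xs : List (String × String))
    (acc : List (Option (String × String))) :
    xs.foldl (fun toks seg =>
      match pvPieces seg.2 with
      | [] => toks
      | first :: rest =>
          rest.foldl (fun t p => t ++ [none, some (seg.1, p)]) (toks ++ [some (seg.1, first)]))
      acc = acc ++ xs.flatMap pvSegToks := by
  induction xs generalizing acc with
  | nil => simp
  | cons seg xs ih =>
      simp only [List.foldl_cons, List.flatMap_cons, ih]
      rcases h : pvPieces seg.2 with _ | ⟨f, r⟩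
      · simp [pvSegToks, h]
      · dsimp only
        rw [PySem.List.foldl_append_eq_flatMap (g := fun p => [none, some (seg.1, p)])]
        simp [pvSegToks, h]

theorem pvTokens_eq (xs : List (String × String)) :
    pvTokens xs = xs.flatMap pvSegToks := by
  unfold pvTokens
  simpa using pvTokens_eq_flatMap_aux xs []

theorem pvFlushGroup_append (g h : List (String × String)) :
    pvFlushGroup (g ++ h) = pvFlushGroup g ++ pvFlushGroup h := by
  simp [pvFlushGroup]

theorem pvFlushGroup_singleton (f p : String) :
    pvFlushGroup [(f, p)] = if p ≠ "" then [(f, p)] else [] := by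
  simp [pvFlushGroup, List.filter]
  split_ifs with h <;> simp_all

-- inner pairing: A's piece loop vs B's grouping fold over that segment's break tokens
theorem pvInner_pair (f : String) (r : List String) :
    ∀ (out : List (List (String × String))) (g : List (String × String)),
    r.foldl (pvLineStep f) (out, pvFlushGroup g)
      = (((r.flatMap (fun p => [none, some (f, p)])).foldl pvTokStep (out, g)).1,
         pvFlushGroup ((r.flatMap (fun p => [none, some (f, p)])).foldl pvTokStep (out, g)).2) := by
  induction r with
  | nil => intro out g; simp
  | cons p r ih =>
      intro out g
      have h1 : pvLineStep f (out, pvFlushGroup g) p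
          = (out ++ [pvFlushGroup g], pvFlushGroup [(f, p)]) := by
        simp [pvLineStep, pvFlushGroup_singleton]
      simp only [List.foldl_cons, List.flatMap_cons, h1, pvTokStep, List.nil_append]
      exact ih (out ++ [pvFlushGroup g]) [(f, p)]

-- outer pairing: A's segment loop vs B's grouping fold over all tokens
theorem pvOuter_pair (xs : List (String × String)) :
    ∀ (out : List (List (String × String))) (g : List (String × String)),
    xs.foldl pvSegStep (out, pvFlushGroup g)
      = (((xs.flatMap pvSegToks).foldl pvTokStep (out, g)).1,
         pvFlushGroup ((xs.flatMap pvSegToks).foldl pvTokStep (out, g)).2) := by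
  induction xs with
  | nil => intro out g; simp
  | cons seg xs ih =>
      intro out g
      rcases h : pvPieces seg.2 with _ | ⟨p0, r⟩
      · simp only [List.foldl_cons, List.flatMap_cons, pvSegToks, pvSegStep, h,
          List.nil_append]
        exact ih out g
      · have hline : (if p0 ≠ "" then pvFlushGroup g ++ [(seg.1, p0)] else pvFlushGroup g)
            = pvFlushGroup (g ++ [(seg.1, p0)]) := by
          rw [pvFlushGroup_append, pvFlushGroup_singleton]
          split_ifs <;> simp
        simp only [List.foldl_cons, List.flatMap_cons, pvSegToks, pvSegStep, h,
          List.cons_append, List.foldl_cons, pvTokStep, hline, List.foldl_append]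
        rw [pvInner_pair seg.1 r out (g ++ [(seg.1, p0)])]
        induction r generalizing out with
        | nil => simp [ih]
        | cons p r' _ =>
            simp only [List.flatMap_cons, List.foldl_cons, List.foldl_append] at *
            exact ih _ _

-- ===== VERDICT (by name: the statement is the Claim_ definition above) =====
theorem split_texts_into_lines_py_spec : Claim_equal_split_texts_into_lines_py := by
  intro xs _
  unfold Spec_split_texts_into_lines_py split_texts_into_lines_py split_texts_into_lines_py_alt
  rw [pvTokens_eq]
  have h0 : (([], []) : List (List (String × String)) × List (String × String))
      = (([], pvFlushGroup []) : _ × _) := by simp [pvFlushGroup]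
  rw [h0, pvOuter_pair xs [] []]
  simp [pvFlushGroup]
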